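-- pv_equiv track=rewrite | github.com/jsierrahoopshype/nba-trade-rumor-rankings | scrape_trade_rumors.py | guess_player
-- ===== SOURCE A (Python) =====
-- from typing import List, Dict, Optional, Tuple
--
-- def guess_player(snippet: str, players_upper: List[str]) -> Optional[str]:
--     """
--     Find player mentioned in snippet using player list.
--     Returns properly formatted name or None (never 'nan').
--     """
--     if not snippet:
--         return None
--
--     text_upper = snippet.upper()
--
--     # Try to find the longest matching name first (handles "LeBron James" vs "James")
--     matches = []
--     for name_upper in players_upper:
--         if name_upper in text_upper:
--             matches.append(name_upper)
--
--     if not matches: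
--         return None
--
--     # Return the longest match (most specific)
--     best_match = max(matches, key=len)
--
--     # Convert back to title case properly
--     # Handle special cases like "LeBron", "DeRozan", "McCollum"
--     parts = best_match.split()
--     formatted_parts = []
--     for part in parts:
--         # Check for common prefixes that need special handling
--         if part.startswith("MC"):
--             formatted_parts.append("Mc" + part[2:].capitalize())
--         elif part.startswith("DE") and len(part) > 2:
--             formatted_parts.append("De" + part[2:].capitalize())
--         elif part.startswith("LE") and len(part) > 2:
--             formatted_parts.append("Le" + part[2:].capitalize())
--         elif part.startswith("LA") and len(part) > 2:
--             formatted_parts.append("La" + part[2:].capitalize())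
--         else:
--             formatted_parts.append(part.capitalize())
--
--     return " ".join(formatted_parts)
-- ===== SOURCE B (Python) =====
-- def _format_name(name):
--     prefixes = {"MC": "Mc", "DE": "De", "LE": "Le", "LA": "La"}
--     words = []
--     for w in name.split():
--         pre = prefixes.get(w[:2])
--         words.append(pre + w[2:].capitalize() if pre else w.capitalize())
--     return " ".join(words)
--
--
-- def guess_player(snippet, players_upper):
--     """Sort names by length (descending, stable) and return the first that occurs
--     in the uppercased snippet; ties keep original list order, matching A's
--     first-maximal choice."""
--     if not snippet:
--         return None
--     text_upper = snippet.upper()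
--     for name in sorted(players_upper, key=len, reverse=True):
--         if name in text_upper:
--             return _format_name(name)
--     return None
-- ===== Notes on version B (the rewrite author's own statement) =====
-- stated objective: alternative
-- what changed: B replaces A's collect-all-matches-then-max(key=len) scheme by sort-then-scan: it stably sorts the player names by length descending and returns the first sorted name contained in the uppercased snippet (stability makes ties keep A's first-in-list choice), with an early exit instead of testing every name; formatting becomes a table-driven per-word helper instead of A's four-branch if-chain.
import Mathlib
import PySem

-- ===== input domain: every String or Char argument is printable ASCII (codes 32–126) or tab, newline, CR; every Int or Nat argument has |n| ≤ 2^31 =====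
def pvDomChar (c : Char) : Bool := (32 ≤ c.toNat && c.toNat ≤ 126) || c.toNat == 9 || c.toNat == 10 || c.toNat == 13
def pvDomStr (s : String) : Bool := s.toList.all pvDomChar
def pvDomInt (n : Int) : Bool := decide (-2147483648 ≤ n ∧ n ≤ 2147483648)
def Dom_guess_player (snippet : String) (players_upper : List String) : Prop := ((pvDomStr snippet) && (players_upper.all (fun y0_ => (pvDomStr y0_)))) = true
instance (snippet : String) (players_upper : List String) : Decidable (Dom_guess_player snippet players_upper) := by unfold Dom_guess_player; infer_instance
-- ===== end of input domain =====

-- B replaces A's collect-all-matches-then-max(key=len) scheme by sort-then-scan: it sorts the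
-- names by length descending (stable) and returns the first one contained in the uppercased
-- snippet (same value everywhere; not claimed faster).

-- ===== PORT A =====
-- part.capitalize(): first char uppercased, rest lowercased (exact on ASCII; no PySem primitive).
-- Shared by both ports because both Pythons call str.capitalize.
def pvCapitalize (cs : List Char) : List Char :=
  match cs with
  | [] => []
  | c :: rest => PySem.Chars.upperChar c :: PySem.Chars.lower rest

def guess_player (snippet : String) (players_upper : List String) : Option String :=
  if snippet.toList = [] then none
  else
    let text_upper := PySem.Str.upper snippet
    let matches_ := players_upper.foldl
      (fun acc name => if PySem.Str.isIn name text_upper then acc ++ [name] else acc) []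
    if matches_ = [] then none
    else
      match PySem.List.max? matches_ (fun s => PySem.Str.len s) with
      | none => none
      | some best_match =>
        let parts := PySem.Chars.split₀ best_match.toList
        let formatted_parts := parts.foldl
          (fun acc part =>
            if PySem.Chars.startswith part "MC".toList then
              acc ++ ["Mc".toList ++ pvCapitalize (PySem.Chars.slice part (some 2) none)]
            else if PySem.Chars.startswith part "DE".toList && decide (2 < PySem.Chars.len part) then
              acc ++ ["De".toList ++ pvCapitalize (PySem.Chars.slice part (some 2) none)]
            else if PySem.Chars.startswith part "LE".toList && decide (2 < PySem.Chars.len part) then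
              acc ++ ["Le".toList ++ pvCapitalize (PySem.Chars.slice part (some 2) none)]
            else if PySem.Chars.startswith part "LA".toList && decide (2 < PySem.Chars.len part) then
              acc ++ ["La".toList ++ pvCapitalize (PySem.Chars.slice part (some 2) none)]
            else acc ++ [pvCapitalize part]) []
        some (String.ofList (PySem.Chars.join " ".toList formatted_parts))

-- ===== PORT B =====
def pvPrefixes : PySem.Dict (List Char) (List Char) :=
  PySem.Dict.ofList [("MC".toList, "Mc".toList), ("DE".toList, "De".toList),
                     ("LE".toList, "Le".toList), ("LA".toList, "La".toList)]

def pvFmtPart (part : List Char) : List Char :=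
  match PySem.Dict.get? pvPrefixes (PySem.Chars.slice part none (some 2)) with
  | some pre => pre ++ pvCapitalize (PySem.Chars.slice part (some 2) none)
  | none => pvCapitalize part

-- _format_name from Source B: the word loop appending formatted words, then " ".join
def pvFmtName (name : List Char) : List Char :=
  PySem.Chars.join " ".toList
    ((PySem.Chars.split₀ name).foldl (fun acc w => acc ++ [pvFmtPart w]) [])

def guess_player_alt (snippet : String) (players_upper : List String) : Option String :=
  if snippet.toList = [] then none
  else
    let text_upper := PySem.Str.upper snippet
    match (PySem.List.sorted players_upper (fun s => PySem.Str.len s) true).find?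
            (fun name => PySem.Str.isIn name text_upper) with
    | none => none
    | some name => some (String.ofList (pvFmtName name.toList))

-- ===== PRECONDITION & SPEC =====
def Spec_guess_player (snippet : String) (players_upper : List String) (out : Option String) : Prop := out = guess_player_alt snippet players_upper
instance (snippet : String) (players_upper : List String) (out : Option String) : Decidable (Spec_guess_player snippet players_upper out) := by unfold Spec_guess_player; infer_instance

-- ===== CLAIM (what is proved, stated in full; the proofs are below) =====
def Claim_equal_guess_player : Prop := ∀ (snippet : String) (players_upper : List String), Dom_guess_player snippet players_upper → Spec_guess_player snippet players_upper (guess_player snippet players_upper)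

-- ===== LEMMAS AND PROOFS =====

-- The keep-first-strict-max step of Python's max(key=len) (proof-local helper).
def pvStep (acc : Option String) (x : String) : Option String :=
  match acc with
  | none => some x
  | some m => if PySem.Str.len m < PySem.Str.len x then some x else some m

-- max(matches, key=len) IS the left fold of pvStep (by unfolding PySem.List.max?).
theorem pv_max?_eq (xs : List String) :
    PySem.List.max? xs (fun s => PySem.Str.len s) = xs.foldl pvStep none := by
  unfold PySem.List.max?
  congr 1
  funext acc x
  cases acc <;> rfl

-- find? over a descending stable insert: inserting x into a length-descending list and taking
-- the first match is one pvStep of A's keep-first-strict-max fold.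
theorem pv_find_insertBy (p : String → Bool) (x : String) (s : List String)
    (hp : s.Pairwise (fun a b => PySem.Str.len b ≤ PySem.Str.len a)) :
    (PySem.List.insertBy (fun a b => decide (PySem.Str.len b < PySem.Str.len a)) x s).find? p
    = if p x then pvStep (s.find? p) x else s.find? p := by
  induction s with
  | nil =>
    by_cases hx : p x = true <;> simp [PySem.List.insertBy, List.find?, pvStep, hx]
  | cons y ys ih =>
    rcases List.pairwise_cons.mp hp with ⟨hy, hys⟩
    by_cases h : PySem.Str.len y < PySem.Str.len x
    · have hlt : ∀ m ∈ y :: ys, PySem.Str.len m < PySem.Str.len x := by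
        intro m hm
        rcases List.mem_cons.mp hm with rfl | hm'
        · exact h
        · exact lt_of_le_of_lt (hy m hm') h
      simp only [PySem.List.insertBy, h, decide_true, if_true]
      rw [List.find?_cons]
      cases hx : p x with
      | true =>
        rcases hfind : (y :: ys).find? p with _ | m
        · rfl
        · have hlt' := hlt m (List.mem_of_find?_eq_some hfind)
          show some x = pvStep (some m) x
          simp only [pvStep]
          rw [if_pos hlt']
      | false => simp
    · simp only [PySem.List.insertBy, h, decide_false, Bool.false_eq_true, if_false]
      rw [List.find?_cons]
      cases hyp : p y with
      | true =>
        rw [List.find?_cons, hyp]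
        cases hx : p x with
        | true =>
          simp only [if_true, pvStep]
          rw [if_neg h]
        | false => simp
      | false =>
        rw [List.find?_cons, hyp]
        simpa using ih hys

-- Main lemma: first match in the stable length-descending sort (B) is the first maximal-length
-- element of the filtered list (A's max(key=len) over its matches).
theorem pv_find_sorted (xs : List String) (p : String → Bool) :
    (PySem.List.sorted xs (fun s => PySem.Str.len s) true).find? p
    = PySem.List.max? (xs.filter p) (fun s => PySem.Str.len s) := by
  induction xs using List.reverseRecOn with
  | nil => rfl
  | append_singleton xs x ih =>
    rw [PySem.List.sorted_rev_eq_foldl_insertBy, List.foldl_append, List.foldl_cons,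
        List.foldl_nil, ← PySem.List.sorted_rev_eq_foldl_insertBy,
        pv_find_insertBy _ _ _ (PySem.List.sorted_pairwise_rev xs _), ih,
        pv_max?_eq, pv_max?_eq, List.filter_append, List.foldl_append]
    by_cases hx : p x = true
    · simp only [List.filter_cons, List.filter_nil, hx, if_true, List.foldl_cons, List.foldl_nil]
    · simp only [Bool.not_eq_true] at hx
      simp [hx]

-- A's if-chain step on one word equals B's table-driven formatter.
theorem pv_step_eq (acc : List (List Char)) (part : List Char) :
    (if PySem.Chars.startswith part "MC".toList then
       acc ++ ["Mc".toList ++ pvCapitalize (PySem.Chars.slice part (some 2) none)]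
     else if PySem.Chars.startswith part "DE".toList && decide (2 < PySem.Chars.len part) then
       acc ++ ["De".toList ++ pvCapitalize (PySem.Chars.slice part (some 2) none)]
     else if PySem.Chars.startswith part "LE".toList && decide (2 < PySem.Chars.len part) then
       acc ++ ["Le".toList ++ pvCapitalize (PySem.Chars.slice part (some 2) none)]
     else if PySem.Chars.startswith part "LA".toList && decide (2 < PySem.Chars.len part) then
       acc ++ ["La".toList ++ pvCapitalize (PySem.Chars.slice part (some 2) none)]
     else acc ++ [pvCapitalize part])
    = acc ++ [pvFmtPart part] := by
  have hdrop : PySem.Chars.slice part (some 2) none = part.drop 2 := by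
    rw [PySem.Chars.slice_eq_listSlice, PySem.List.slice_from part (by norm_num : (0:Int) ≤ 2)]; rfl
  have hsl2 : PySem.Chars.slice part none (some 2) = part.take 2 := by
    rw [PySem.Chars.slice_eq_listSlice, PySem.List.slice_to part (by norm_num : (0:Int) ≤ 2)]; rfl
  have hsw : ∀ a b : Char, PySem.Chars.startswith part [a,b] = decide (part.take 2 = [a,b]) := by
    intro a b
    rw [Bool.eq_iff_iff, PySem.Chars.startswith_iff, List.prefix_iff_eq_take, decide_eq_true_iff]
    exact eq_comm
  unfold pvFmtPart
  rw [hsl2, hdrop,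
      show ("MC".toList) = ['M','C'] from rfl, show ("DE".toList) = ['D','E'] from rfl,
      show ("LE".toList) = ['L','E'] from rfl, show ("LA".toList) = ['L','A'] from rfl]
  simp only [hsw, PySem.Chars.len_eq]
  by_cases h1 : part.take 2 = ['M','C']
  · rw [h1]
    simp [show PySem.Dict.get? pvPrefixes ['M','C'] = some ['M','c'] from rfl]
  by_cases h2 : part.take 2 = ['D','E']
  · by_cases hl : 2 < part.length
    · rw [h2]
      simp [hl, show PySem.Dict.get? pvPrefixes ['D','E'] = some ['D','e'] from rfl]
    · have hp : part = ['D','E'] := by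
        rw [← h2]; exact (List.take_of_length_le (by omega)).symm
      subst hp
      simp
      decide
  by_cases h3 : part.take 2 = ['L','E']
  · by_cases hl : 2 < part.length
    · rw [h3]
      simp [hl, show PySem.Dict.get? pvPrefixes ['L','E'] = some ['L','e'] from rfl]
    · have hp : part = ['L','E'] := by
        rw [← h3]; exact (List.take_of_length_le (by omega)).symm
      subst hp
      simp
      decide
  by_cases h4 : part.take 2 = ['L','A']
  · by_cases hl : 2 < part.length
    · rw [h4]
      simp [hl, show PySem.Dict.get? pvPrefixes ['L','A'] = some ['L','a'] from rfl]
    · have hp : part = ['L','A'] := by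
        rw [← h4]; exact (List.take_of_length_le (by omega)).symm
      subst hp
      simp
      decide
  · have hg : PySem.Dict.get? pvPrefixes (part.take 2) = none := by
      rw [show pvPrefixes = PySem.Dict.mk [(['M','C'],['M','c']),(['D','E'],['D','e']),(['L','E'],['L','e']),(['L','A'],['L','a'])] from rfl]
      simp only [PySem.Dict.get?_mk_cons, beq_iff_eq]
      rw [if_neg (fun hh => h1 hh.symm), if_neg (fun hh => h2 hh.symm),
          if_neg (fun hh => h3 hh.symm), if_neg (fun hh => h4 hh.symm)]
      rfl
    simp [h1, h2, h3, h4, hg]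

-- A's append loop over the words is acc ++ map of B's formatter.
theorem pv_fmt_loop (parts : List (List Char)) (acc : List (List Char)) :
    parts.foldl
      (fun acc part =>
        if PySem.Chars.startswith part "MC".toList then
          acc ++ ["Mc".toList ++ pvCapitalize (PySem.Chars.slice part (some 2) none)]
        else if PySem.Chars.startswith part "DE".toList && decide (2 < PySem.Chars.len part) then
          acc ++ ["De".toList ++ pvCapitalize (PySem.Chars.slice part (some 2) none)]
        else if PySem.Chars.startswith part "LE".toList && decide (2 < PySem.Chars.len part) then
          acc ++ ["Le".toList ++ pvCapitalize (PySem.Chars.slice part (some 2) none)]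
        else if PySem.Chars.startswith part "LA".toList && decide (2 < PySem.Chars.len part) then
          acc ++ ["La".toList ++ pvCapitalize (PySem.Chars.slice part (some 2) none)]
        else acc ++ [pvCapitalize part]) acc
    = acc ++ parts.map pvFmtPart := by
  induction parts generalizing acc with
  | nil => simp
  | cons p ps ih => rw [List.foldl_cons, pv_step_eq, ih, List.append_assoc]; rfl

-- ===== VERDICT (by name: the statement is the Claim_ definition above) =====
theorem guess_player_spec : Claim_equal_guess_player := by
  intro snippet players _
  unfold Spec_guess_player guess_player guess_player_alt
  by_cases hs : snippet.toList = []
  · simp [hs]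
  · simp only [hs, if_false]
    rw [PySem.List.foldl_append_if (p := fun n => PySem.Str.isIn n (PySem.Str.upper snippet)) (f := fun x => x)]
    simp only [List.nil_append, List.map_id']
    rw [pv_find_sorted]
    by_cases hf : List.filter (fun n => PySem.Str.isIn n (PySem.Str.upper snippet)) players = []
    · rw [if_pos hf, hf]; rfl
    · rw [if_neg hf]
      rcases hm : PySem.List.max? (List.filter (fun n => PySem.Str.isIn n (PySem.Str.upper snippet)) players) (fun s => PySem.Str.len s) with _ | best
      · rfl
      · simp only [pv_fmt_loop, List.nil_append]
        unfold pvFmtName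
        rw [PySem.List.foldl_append_singleton_eq_map, List.nil_append]
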